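-- pv_equiv track=rewrite | github.com/sassoncharlotte/Cartable-Fantastique | fantastic/exercises/utils.py | replace_symbols_for_sentences
-- ===== SOURCE A (Python) =====
-- def replace_symbols_for_sentences(
--     text: str, symbols=[".", "!", "?"], replacing_symbol="$"
-- ) -> str:
--     replaced_text = ""
--
--     # replacing all symbols in the text with the replacing symbol
--     for char in text[:-1]:
--         replaced_text += char
--         if char in symbols:
--             replaced_text += replacing_symbol
--
--     replaced_text += text[-1]
--     return replaced_text
-- ===== SOURCE B (Python) =====
-- def replace_symbols_for_sentences(
--     text: str, symbols=[".", "!", "?"], replacing_symbol="$"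
-- ) -> str:
--     last = text[-1]
--     table = {ord(s): s + replacing_symbol for s in symbols if len(s) == 1}
--     return text[:-1].translate(table) + last
-- ===== Notes on version B (the rewrite author's own statement) =====
-- stated objective: idiomatic
-- what changed: B replaces A's explicit character loop with incremental membership tests by a translation table built once from the single-character symbols and a single str.translate pass over text[:-1].
-- outside the precondition, e.g. on replace_symbols_for_sentences('', ['.'], '$'): A raises IndexError, B raises IndexError
import Mathlib
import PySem

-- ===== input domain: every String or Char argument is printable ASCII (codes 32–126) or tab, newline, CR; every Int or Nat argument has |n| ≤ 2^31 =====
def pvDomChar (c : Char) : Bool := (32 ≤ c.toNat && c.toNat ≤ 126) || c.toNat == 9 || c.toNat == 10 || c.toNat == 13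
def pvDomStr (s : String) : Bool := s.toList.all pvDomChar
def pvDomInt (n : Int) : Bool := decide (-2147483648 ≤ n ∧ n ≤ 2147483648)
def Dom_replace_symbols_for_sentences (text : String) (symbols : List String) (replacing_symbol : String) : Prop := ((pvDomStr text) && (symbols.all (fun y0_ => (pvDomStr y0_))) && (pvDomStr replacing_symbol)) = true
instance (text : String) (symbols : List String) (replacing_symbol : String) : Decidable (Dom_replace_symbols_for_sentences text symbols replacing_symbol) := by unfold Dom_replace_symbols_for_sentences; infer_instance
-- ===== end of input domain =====

-- B builds a translation table from the single-character symbols once and does one translate pass over text[:-1];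
-- A loops over the characters appending and testing list membership per character. Equivalence is about the return value.

-- ===== PORT A =====
def replace_symbols_for_sentences (text : String) (symbols : List String) (replacing_symbol : String) : String :=
  let cs := text.toList
  let replaced := (PySem.List.slice cs none (some (-1))).foldl
    (fun acc c =>
      let acc2 := acc ++ [c]
      if String.ofList [c] ∈ symbols then acc2 ++ replacing_symbol.toList else acc2) []
  String.ofList (replaced ++ [PySem.List.pyGetD cs (-1) ' '])

-- ===== PORT B =====
-- the dict comprehension {ord(s): s + replacing_symbol for s in symbols if len(s) == 1}
def bTable (symbols : List String) (repl : List Char) : PySem.Dict Char (List Char) :=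
  symbols.foldl
    (fun d s => if s.length = 1 then d.insert (s.toList.headD ' ') (s.toList ++ repl) else d)
    PySem.Dict.empty

def replace_symbols_for_sentences_alt (text : String) (symbols : List String) (replacing_symbol : String) : String :=
  let cs := text.toList
  let last := PySem.List.pyGetD cs (-1) ' '  -- text[-1]; Pre_ excludes the empty text where Python raises
  let table := bTable symbols replacing_symbol.toList
  -- text[:-1].translate(table): each char is replaced by its table entry, or kept
  let body := (PySem.List.slice cs none (some (-1))).flatMap (fun c => (table.get? c).getD [c])
  String.ofList (body ++ [last])

-- ===== PRECONDITION & SPEC =====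
-- Pre_ excludes only the empty text, on which both Pythons raise IndexError at text[-1].
def Pre_replace_symbols_for_sentences (text : String) (symbols : List String) (replacing_symbol : String) : Prop := text ≠ ""
instance (text : String) (symbols : List String) (replacing_symbol : String) : Decidable (Pre_replace_symbols_for_sentences text symbols replacing_symbol) := by unfold Pre_replace_symbols_for_sentences; infer_instance
def pvWitness_replace_symbols_for_sentences : String × List String × String := ("Hi. Go!", [".", "!", "?"], "$")

def Spec_replace_symbols_for_sentences (text : String) (symbols : List String) (replacing_symbol : String) (out : String) : Prop := out = replace_symbols_for_sentences_alt text symbols replacing_symbol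
instance (text : String) (symbols : List String) (replacing_symbol : String) (out : String) : Decidable (Spec_replace_symbols_for_sentences text symbols replacing_symbol out) := by unfold Spec_replace_symbols_for_sentences; infer_instance

-- ===== CLAIM (what is proved, stated in full; the proofs are below) =====
def Claim_equal_replace_symbols_for_sentences : Prop := ∀ (text : String) (symbols : List String) (replacing_symbol : String), Dom_replace_symbols_for_sentences text symbols replacing_symbol → Pre_replace_symbols_for_sentences text symbols replacing_symbol → Spec_replace_symbols_for_sentences text symbols replacing_symbol (replace_symbols_for_sentences text symbols replacing_symbol)

-- ===== LEMMAS AND PROOFS =====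
lemma eq_ofList_singleton (s : String) (c : Char) (h : s.toList = [c]) : s = String.ofList [c] := by
  rw [← h]; exact String.ofList_toList.symm

lemma bTable_get? (repl : List Char) (c : Char) (symbols : List String) :
    ∀ d : PySem.Dict Char (List Char),
      (symbols.foldl
        (fun d s => if s.length = 1 then d.insert (s.toList.headD ' ') (s.toList ++ repl) else d)
        d).get? c
      = if String.ofList [c] ∈ symbols then some ([c] ++ repl) else d.get? c := by
  induction symbols with
  | nil => intro d; simp
  | cons s rest ih =>
    intro d
    simp only [List.foldl_cons, ih, List.mem_cons]
    by_cases hr : String.ofList [c] ∈ rest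
    · simp [hr]
    · simp only [hr, or_false, if_false]
      by_cases hs : String.ofList [c] = s
      · have hcs : s.toList = [c] := by rw [← hs]; simp
        have hlen : s.length = 1 := by rw [← String.length_toList, hcs]; rfl
        rw [if_pos hs, if_pos hlen, hcs]
        simp [PySem.Dict.get?_insert_self]
      · rw [if_neg hs]
        by_cases hl : s.length = 1
        · obtain ⟨k, hk⟩ : ∃ k, s.toList = [k] := by
            have : s.toList.length = 1 := by rw [String.length_toList, hl]
            cases h : s.toList with
            | nil => simp [h] at this
            | cons a t => cases t with
              | nil => exact ⟨a, rfl⟩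
              | cons b u => simp [h] at this
          have hck : c ≠ k := by
            intro h
            exact hs ((eq_ofList_singleton s c (h ▸ hk)).symm)
          rw [if_pos hl, hk]
          simpa using PySem.Dict.get?_insert_of_ne d (κ := Char) ([k] ++ repl) hck
        · rw [if_neg hl]

lemma bTable_entry (symbols : List String) (repl : List Char) (c : Char) :
    ((bTable symbols repl).get? c).getD [c]
      = if String.ofList [c] ∈ symbols then [c] ++ repl else [c] := by
  unfold bTable
  rw [bTable_get? repl c symbols PySem.Dict.empty]
  by_cases h : String.ofList [c] ∈ symbols <;> simp [h, PySem.Dict.get?_empty]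

lemma foldA (symbols : List String) (r : List Char) :
    ∀ (body acc : List Char),
      body.foldl
        (fun acc c =>
          let acc2 := acc ++ [c]
          if String.ofList [c] ∈ symbols then acc2 ++ r else acc2) acc
      = acc ++ body.flatMap (fun c => if String.ofList [c] ∈ symbols then [c] ++ r else [c]) := by
  intro body
  induction body with
  | nil => intro acc; simp
  | cons c rest ih =>
    intro acc
    simp only [List.foldl_cons, List.flatMap_cons, ih]
    by_cases h : String.ofList [c] ∈ symbols <;> simp [h]

-- ===== VERDICT (by name: the statement is the Claim_ definition above) =====
theorem replace_symbols_for_sentences_spec : Claim_equal_replace_symbols_for_sentences := by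
  intro text symbols replacing_symbol _ _
  unfold Spec_replace_symbols_for_sentences
  unfold replace_symbols_for_sentences replace_symbols_for_sentences_alt
  simp only [foldA]
  congr 2
  apply List.flatMap_congr
  intro c _
  rw [bTable_entry]
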